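-- pv_equiv track=rewrite | github.com/Olimpiaaxx/Python-Projects | Find Word.py | find_word_once
-- ===== SOURCE A (Python) =====
-- def find_word_once(word, string):
--     word = list(word)
--     string = list(string)
--
--     for item in word:
--         if item in string:
--             string.remove(item)
--             continue
--         else:
--             return False
--     return True
-- ===== SOURCE B (Python) =====
-- def find_word_once(word, string):
--     need = {}
--     for ch in word:
--         need[ch] = need.get(ch, 0) + 1
--     have = {}
--     for ch in string:
--         have[ch] = have.get(ch, 0) + 1
--     return all(have.get(ch, 0) >= n for ch, n in need.items())
-- ===== Notes on version B (the rewrite author's own statement) =====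
-- stated objective: faster
-- what changed: Replaced the per-character membership-test-and-remove scans over a shrinking list with two one-pass frequency dictionaries compared at the end.
import Mathlib
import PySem

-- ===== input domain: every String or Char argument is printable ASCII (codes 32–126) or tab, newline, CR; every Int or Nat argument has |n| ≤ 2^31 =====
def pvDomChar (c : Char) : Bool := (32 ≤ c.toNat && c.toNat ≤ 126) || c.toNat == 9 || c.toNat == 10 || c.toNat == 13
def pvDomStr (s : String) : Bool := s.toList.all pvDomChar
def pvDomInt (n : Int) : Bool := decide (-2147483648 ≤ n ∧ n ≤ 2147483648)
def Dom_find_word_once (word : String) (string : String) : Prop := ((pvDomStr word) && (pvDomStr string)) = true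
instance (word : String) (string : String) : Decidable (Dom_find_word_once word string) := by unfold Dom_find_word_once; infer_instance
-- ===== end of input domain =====

-- B replaces A's repeated membership-and-remove scans by two one-pass frequency dictionaries (faster).

-- ===== PORT A =====
-- 'for item in word: if item in string: string.remove(item) else: return False';
-- list.remove of a present element is List.erase (PySem.List.remove?_eq_some_erase).
def findWordLoop : List Char → List Char → Bool
  | [], _ => true
  | c :: w, s => if c ∈ s then findWordLoop w (s.erase c) else false

def find_word_once (word : String) (string : String) : Bool :=
  findWordLoop word.toList string.toList

-- ===== PORT B =====
-- need/have: 'd[ch] = d.get(ch, 0) + 1' over each input, then all(have.get(ch,0) >= n for ch,n in need.items())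
def find_word_once_alt (word : String) (string : String) : Bool :=
  let need := word.toList.foldl (fun d x => d.insert x (d.getD x 0 + 1)) (PySem.Dict.empty : PySem.Dict Char Int)
  let haveC := string.toList.foldl (fun d x => d.insert x (d.getD x 0 + 1)) (PySem.Dict.empty : PySem.Dict Char Int)
  need.items.all (fun p => decide (p.2 ≤ haveC.getD p.1 0))

-- ===== PRECONDITION & SPEC =====
def Spec_find_word_once (word : String) (string : String) (out : Bool) : Prop := out = find_word_once_alt word string
instance (word : String) (string : String) (out : Bool) : Decidable (Spec_find_word_once word string out) := by unfold Spec_find_word_once; infer_instance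

-- ===== CLAIM (what is proved, stated in full; the proofs are below) =====
def Claim_equal_find_word_once : Prop := ∀ (word : String) (string : String), Dom_find_word_once word string → Spec_find_word_once word string (find_word_once word string)

-- ===== LEMMAS AND PROOFS =====

-- A's loop succeeds iff every character occurs in s at least as often as in w.
theorem findWordLoop_iff (w s : List Char) :
    findWordLoop w s = true ↔ ∀ c, w.count c ≤ s.count c := by
  induction w generalizing s with
  | nil => simp [findWordLoop]
  | cons c w ih =>
    simp only [findWordLoop]
    by_cases hc : c ∈ s
    · rw [if_pos hc, ih]
      have hpos : 1 ≤ s.count c := List.one_le_count_iff.mpr hc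
      constructor
      · intro h d
        have hd := h d
        rcases eq_or_ne d c with rfl | hne
        · rw [List.count_erase_self] at hd
          rw [List.count_cons_self]
          omega
        · rw [List.count_erase_of_ne hne] at hd
          rw [List.count_cons_of_ne hne.symm]
          exact hd
      · intro h d
        have hd := h d
        rcases eq_or_ne d c with rfl | hne
        · rw [List.count_erase_self]
          rw [List.count_cons_self] at hd
          omega
        · rw [List.count_erase_of_ne hne]
          rw [List.count_cons_of_ne hne.symm] at hd
          exact hd
    · rw [if_neg hc]
      simp only [Bool.false_eq_true, false_iff, not_forall]
      refine ⟨c, ?_⟩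
      have h0 : s.count c = 0 := List.count_eq_zero.mpr hc
      have h1 : (c :: w).count c = w.count c + 1 := List.count_cons_self
      omega

-- B equals the same count condition.
theorem alt_iff (word string : String) :
    find_word_once_alt word string = true ↔ ∀ c, word.toList.count c ≤ string.toList.count c := by
  simp only [find_word_once_alt, PySem.Dict.foldl_insert_getD_add_one_eq_counter,
    PySem.Dict.items_counter, List.all_map, List.all_eq_true, Function.comp,
    PySem.Dict.getD_counter, PySem.Set.mem_ofList, decide_eq_true_eq, Int.ofNat_le]
  constructor
  · intro h c
    by_cases hcw : c ∈ word.toList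
    · exact h c hcw
    · simp [List.count_eq_zero.mpr hcw]
  · intro h c _
    exact h c

-- ===== VERDICT (by name: the statement is the Claim_ definition above) =====
theorem find_word_once_spec : Claim_equal_find_word_once := by
  intro word string _
  unfold Spec_find_word_once find_word_once
  have h := (findWordLoop_iff word.toList string.toList).trans (alt_iff word string).symm
  cases ha : findWordLoop word.toList string.toList <;>
  cases hb : find_word_once_alt word string <;> simp_all
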